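-- pv_equiv track=rewrite | github.com/shasdemir/algorithms | L5/L5.py | bfs_allpaths
-- ===== SOURCE A (Python) =====
-- def bfs_allpaths(G, v):
--     open_list = [v]
--     path_from_start = {v: [v]}
--
--     while open_list:
--         current = open_list.pop(0)  # bfs
--
--         for neighbor in G[current]:
--             if neighbor not in path_from_start:
--                 path_from_start[neighbor] = path_from_start[current] + [neighbor]
--                 open_list.append(neighbor)
--     return path_from_start
-- ===== SOURCE B (Python) =====
-- def bfs_allpaths(G, v):
--     # Same FIFO BFS, but store only each node's BFS parent and the discovery
--     # order; full paths are reconstructed afterwards by walking parent links.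
--     parent = {v: None}
--     order = [v]
--     i = 0
--     while i < len(order):
--         current = order[i]
--         i += 1
--         for neighbor in G[current]:
--             if neighbor not in parent:
--                 parent[neighbor] = current
--                 order.append(neighbor)
--     result = {}
--     for n in order:
--         path = []
--         x = n
--         while x is not None:
--             path.append(x)
--             x = parent[x]
--         result[n] = path[::-1]
--     return result
-- ===== Notes on version B (the rewrite author's own statement) =====
-- stated objective: alternative
-- what changed: Instead of storing a full path list per node during BFS, B keeps only a parent pointer per discovered node (plus the discovery order, scanned by index rather than pop(0)) and reconstructs every path in a second pass by walking parent links back to v and reversing.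
import Mathlib
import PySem

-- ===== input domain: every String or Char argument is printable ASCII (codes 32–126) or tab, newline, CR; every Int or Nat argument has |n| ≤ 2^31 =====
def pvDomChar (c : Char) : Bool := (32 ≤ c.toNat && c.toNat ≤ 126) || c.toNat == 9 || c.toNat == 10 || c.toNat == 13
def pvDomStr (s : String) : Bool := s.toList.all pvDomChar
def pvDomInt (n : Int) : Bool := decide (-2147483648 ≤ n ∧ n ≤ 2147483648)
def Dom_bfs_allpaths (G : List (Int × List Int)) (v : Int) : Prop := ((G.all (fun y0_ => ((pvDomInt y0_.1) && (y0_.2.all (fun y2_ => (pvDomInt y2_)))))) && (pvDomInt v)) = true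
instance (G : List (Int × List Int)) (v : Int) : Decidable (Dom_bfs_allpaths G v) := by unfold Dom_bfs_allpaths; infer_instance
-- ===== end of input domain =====

-- B stores one parent pointer per node during BFS and reconstructs every path afterwards
-- by walking parent links, instead of A's per-node full path lists; return values agree on Pre_.

-- fuel bound used by both loop ports: total queue pushes ≤ 1 + total number of neighbour occurrences
def pvFuel (G : List (Int × List Int)) : Nat := (G.map (fun p => p.2.length)).sum + 1

-- ===== PORT A =====
-- body of A's inner `for neighbor in G[current]` loop
def stepA (c : Int) (s : PySem.Dict Int (List Int) × List Int) (n : Int) :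
    PySem.Dict Int (List Int) × List Int :=
  if s.1.contains n then s
  else (s.1.insert n (s.1.getD c [] ++ [n]), s.2 ++ [n])

-- A's `while open_list` loop; `(gd.get? c).getD []` is G[current] (Pre_ excludes the KeyError case)
def loopA (gd : PySem.Dict Int (List Int)) :
    Nat → List Int → PySem.Dict Int (List Int) → PySem.Dict Int (List Int)
  | 0, _, d => d
  | _ + 1, [], d => d
  | f + 1, c :: rest, d =>
      let st := ((gd.get? c).getD []).foldl (stepA c) (d, rest)
      loopA gd f st.2 st.1

def bfs_allpaths (G : List (Int × List Int)) (v : Int) : List (Int × List Int) :=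
  (loopA (PySem.Dict.ofList G) (pvFuel G) [v] (PySem.Dict.empty.insert v [v])).items

-- ===== PORT B =====
-- body of B's inner loop: record parent, extend discovery order and the pending queue
def stepB (c : Int) (s : PySem.Dict Int (Option Int) × List Int × List Int) (n : Int) :
    PySem.Dict Int (Option Int) × List Int × List Int :=
  if s.1.contains n then s
  else (s.1.insert n (some c), s.2.1 ++ [n], s.2.2 ++ [n])

-- B's index-scanned BFS loop: the pending queue is order[i:], kept as an explicit list
def loopB (gd : PySem.Dict Int (List Int)) :
    Nat → List Int → PySem.Dict Int (Option Int) → List Int →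
    PySem.Dict Int (Option Int) × List Int
  | 0, _, p, order => (p, order)
  | _ + 1, [], p, order => (p, order)
  | f + 1, c :: rest, p, order =>
      let st := ((gd.get? c).getD []).foldl (stepB c) (p, order, rest)
      loopB gd f st.2.2 st.1 st.2.1

-- B's `while x is not None` walk (fuel-guarded; chains are shorter than the dict)
def walkB (p : PySem.Dict Int (Option Int)) : Nat → Option Int → List Int → List Int
  | 0, _, path => path.reverse
  | _ + 1, none, path => path.reverse
  | f + 1, some m, path => walkB p f ((p.get? m).getD none) (path ++ [m])

def bfs_allpaths_alt (G : List (Int × List Int)) (v : Int) : List (Int × List Int) :=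
  let gd := PySem.Dict.ofList G
  let st := loopB gd (pvFuel G) [v] (PySem.Dict.empty.insert v none) [v]
  (st.2.foldl (fun r n => r.insert n (walkB st.1 (st.1.size + 1) (some n) []))
      PySem.Dict.empty).items

-- ===== PRECONDITION & SPEC =====
-- n-step neighbour closure of S in G (non-keys contribute no neighbours); the standard
-- reachable-set fixpoint, independent of either port's loop (no queue, no paths, no parents)
def pvReachClosure (gd : PySem.Dict Int (List Int)) : Nat → List Int → List Int
  | 0, S => S
  | k + 1, S =>
      pvReachClosure gd k ((S.flatMap (fun x => (gd.get? x).getD [])).foldl PySem.Set.add S)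

-- exact domain of Python A: it raises KeyError iff some node reachable from v (v included)
-- is not a key of G; G.length + 1 closure steps reach every reachable node
def Pre_bfs_allpaths (G : List (Int × List Int)) (v : Int) : Prop :=
  (pvReachClosure (PySem.Dict.ofList G) (G.length + 1) [v]).all
    (fun x => (G.map Prod.fst).contains x) = true
instance (G : List (Int × List Int)) (v : Int) : Decidable (Pre_bfs_allpaths G v) := by
  unfold Pre_bfs_allpaths; infer_instance

def pvWitness_bfs_allpaths : (List (Int × List Int)) × Int := ([(0, [1]), (1, [0, 1])], 0)

def Spec_bfs_allpaths (G : List (Int × List Int)) (v : Int) (out : List (Int × List Int)) : Prop := out = bfs_allpaths_alt G v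
instance (G : List (Int × List Int)) (v : Int) (out : List (Int × List Int)) : Decidable (Spec_bfs_allpaths G v out) := by unfold Spec_bfs_allpaths; infer_instance

-- ===== CLAIM (what is proved, stated in full; the proofs are below) =====
def Claim_equal_bfs_allpaths : Prop := ∀ (G : List (Int × List Int)) (v : Int), Dom_bfs_allpaths G v → Pre_bfs_allpaths G v → Spec_bfs_allpaths G v (bfs_allpaths G v)

-- ===== LEMMAS AND PROOFS =====

-- path to k read off a parent list given newest-first (`items.reverse`)
def rpath : List (Int × Option Int) → Int → List Int
  | [], _ => []
  | (n, pa) :: rest, k =>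
      if k = n then (match pa with | none => [k] | some c => rpath rest c ++ [k])
      else rpath rest k

-- well-formed newest-first parent list: parents point to older entries, keys fresh
def wfp : List (Int × Option Int) → Prop
  | [] => True
  | (n, pa) :: rest =>
      (∀ c, pa = some c → c ∈ rest.map Prod.fst) ∧ n ∉ rest.map Prod.fst ∧ wfp rest

-- coupled-state invariant of the two BFS loops
def BfsInv (dA : PySem.Dict Int (List Int)) (p : PySem.Dict Int (Option Int))
    (order q : List Int) : Prop :=
  order = p.keys ∧
  dA.items = p.keys.map (fun n => (n, rpath p.items.reverse n)) ∧
  wfp p.items.reverse ∧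
  (∀ x ∈ q, p.contains x = true)

theorem rpath_len_le (l : List (Int × Option Int)) (k : Int) : (rpath l k).length ≤ l.length := by
  induction l generalizing k with
  | nil => simp [rpath]
  | cons hd tl ih =>
      obtain ⟨n, pa⟩ := hd
      by_cases h : k = n
      · subst h
        cases pa with
        | none => simp [rpath]
        | some c => simpa [rpath] using Nat.succ_le_succ (ih c)
      · simp only [rpath, if_neg h]
        exact le_trans (ih k) (Nat.le_succ _)

theorem rpath_len_pos (l : List (Int × Option Int)) (k : Int) (h : k ∈ l.map Prod.fst) :
    1 ≤ (rpath l k).length := by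
  induction l generalizing k with
  | nil => simp at h
  | cons hd tl ih =>
      obtain ⟨n, pa⟩ := hd
      by_cases hk : k = n
      · subst hk; cases pa <;> simp [rpath]
      · simp only [rpath, if_neg hk]
        apply ih
        simp only [List.map_cons, List.mem_cons] at h
        tauto

theorem wfp_mem_parent (l : List (Int × Option Int)) (k c : Int) (hw : wfp l)
    (h : (k, some c) ∈ l) : c ∈ l.map Prod.fst := by
  induction l with
  | nil => simp at h
  | cons hd tl ih =>
      obtain ⟨n, pa⟩ := hd
      obtain ⟨hpa, hn, hw'⟩ := hw
      rcases List.mem_cons.mp h with heq | hmem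
      · obtain ⟨rfl, rfl⟩ : k = n ∧ pa = some c := by
          exact ⟨congrArg Prod.fst heq, (congrArg Prod.snd heq).symm⟩
        exact List.mem_cons_of_mem _ (hpa c rfl)
      · exact List.mem_cons_of_mem _ (ih hw' hmem)

theorem wfp_nodup (l : List (Int × Option Int)) (hw : wfp l) : (l.map Prod.fst).Nodup := by
  induction l with
  | nil => simp
  | cons hd tl ih =>
      obtain ⟨n, pa⟩ := hd
      obtain ⟨hpa, hn, hw'⟩ := hw
      refine List.nodup_cons.mpr ⟨?_, ih hw'⟩
      simpa using hn

theorem rpath_some (l : List (Int × Option Int)) (k c : Int) (hw : wfp l)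
    (h : (k, some c) ∈ l) : rpath l k = rpath l c ++ [k] := by
  induction l generalizing k c with
  | nil => simp at h
  | cons hd tl ih =>
      obtain ⟨n, pa⟩ := hd
      obtain ⟨hpa, hn, hw'⟩ := hw
      rcases List.mem_cons.mp h with heq | hmem
      · obtain ⟨rfl, rfl⟩ : k = n ∧ pa = some c := by
          exact ⟨congrArg Prod.fst heq, (congrArg Prod.snd heq).symm⟩
        have hc : c ∈ tl.map Prod.fst := hpa c rfl
        have hcn : c ≠ k := fun hcn => hn (hcn ▸ hc)
        simp [rpath, if_neg hcn]
      · have hkmem : k ∈ tl.map Prod.fst := by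
          simpa using List.mem_map_of_mem (f := Prod.fst) hmem
        have hkn : k ≠ n := fun hkn => hn (hkn ▸ hkmem)
        have hcmem : c ∈ tl.map Prod.fst := wfp_mem_parent tl k c hw' hmem
        have hcn : c ≠ n := fun hcn => hn (hcn ▸ hcmem)
        simp only [rpath, if_neg hkn, if_neg hcn]
        exact ih k c hw' hmem

theorem rpath_none (l : List (Int × Option Int)) (k : Int) (hw : wfp l)
    (h : (k, none) ∈ l) : rpath l k = [k] := by
  induction l generalizing k with
  | nil => simp at h
  | cons hd tl ih =>
      obtain ⟨n, pa⟩ := hd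
      obtain ⟨hpa, hn, hw'⟩ := hw
      rcases List.mem_cons.mp h with heq | hmem
      · obtain ⟨rfl, rfl⟩ : k = n ∧ pa = none := by
          exact ⟨congrArg Prod.fst heq, (congrArg Prod.snd heq).symm⟩
        simp [rpath]
      · have hkmem : k ∈ tl.map Prod.fst := by
          simpa using List.mem_map_of_mem (f := Prod.fst) hmem
        have hkn : k ≠ n := fun hkn => hn (hkn ▸ hkmem)
        simp only [rpath, if_neg hkn]
        exact ih k hw' hmem

theorem walkB_none (p : PySem.Dict Int (Option Int)) (f : Nat) (path : List Int) :
    walkB p f none path = path.reverse := by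
  cases f <;> rfl

theorem walkB_eq_rpath (p : PySem.Dict Int (Option Int)) (f : Nat) :
    ∀ (k : Int) (acc : List Int), wfp p.items.reverse → k ∈ p.items.reverse.map Prod.fst →
      (rpath p.items.reverse k).length ≤ f →
      walkB p f (some k) acc = rpath p.items.reverse k ++ acc.reverse := by
  induction f with
  | zero =>
      intro k acc hw hk hlen
      have := rpath_len_pos _ k hk
      omega
  | succ f ih =>
      intro k acc hw hk hlen
      have hck : p.contains k = true := by
        rw [PySem.Dict.contains_eq_decide_mem_keys]
        simp only [PySem.Dict.keys]
        simp only [List.map_reverse, List.mem_reverse] at hk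
        simpa using hk
      obtain ⟨pa, hpa⟩ : ∃ pa, p.get? k = some pa := by
        rw [PySem.Dict.contains_eq_isSome_get?] at hck
        exact Option.isSome_iff_exists.mp hck
      have hmemrev : (k, pa) ∈ p.items.reverse :=
        List.mem_reverse.mpr (PySem.Dict.mem_items_of_get?_eq_some _ hpa)
      show walkB p f ((p.get? k).getD none) (acc ++ [k]) = _
      rw [hpa]
      cases pa with
      | none =>
          rw [Option.getD_some, walkB_none, rpath_none _ _ hw hmemrev]
          simp
      | some c =>
          have hr := rpath_some _ k c hw hmemrev
          have hlc : (rpath p.items.reverse c).length ≤ f := by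
            rw [hr] at hlen; simp at hlen; omega
          have hcmem : c ∈ p.items.reverse.map Prod.fst := wfp_mem_parent _ k c hw hmemrev
          rw [Option.getD_some, ih c (acc ++ [k]) hw hcmem hlc, hr]
          simp

-- keys of the two dicts coincide under the invariant's items equation
theorem keys_eq_of_items (dA : PySem.Dict Int (List Int)) (p : PySem.Dict Int (Option Int))
    (h : dA.items = p.keys.map (fun n => (n, rpath p.items.reverse n))) : dA.keys = p.keys := by
  simp only [PySem.Dict.keys] at *
  rw [h, List.map_map]
  simp [Function.comp_def]

theorem nodup_keys_of_wfp (p : PySem.Dict Int (Option Int)) (hw : wfp p.items.reverse) :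
    p.keys.Nodup := by
  have := wfp_nodup _ hw
  rw [List.map_reverse, List.nodup_reverse] at this
  simpa [PySem.Dict.keys] using this

theorem mem_rev_fst_of_mem_keys (p : PySem.Dict Int (Option Int)) (k : Int)
    (h : k ∈ p.keys) : k ∈ p.items.reverse.map Prod.fst := by
  rw [List.map_reverse, List.mem_reverse]
  simpa [PySem.Dict.keys] using h

theorem fold_coupled (c : Int) (ns : List Int) :
    ∀ (dA : PySem.Dict Int (List Int)) (p : PySem.Dict Int (Option Int)) (order q : List Int),
      BfsInv dA p order q → p.contains c = true →
      BfsInv (ns.foldl (stepA c) (dA, q)).1 (ns.foldl (stepB c) (p, order, q)).1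
          (ns.foldl (stepB c) (p, order, q)).2.1 (ns.foldl (stepB c) (p, order, q)).2.2 ∧
      (ns.foldl (stepA c) (dA, q)).2 = (ns.foldl (stepB c) (p, order, q)).2.2 ∧
      (ns.foldl (stepB c) (p, order, q)).1.contains c = true := by
  induction ns with
  | nil => intro dA p order q hInv hc; exact ⟨hInv, rfl, hc⟩
  | cons n ns ih =>
      intro dA p order q hInv hc
      obtain ⟨hord, hitems, hwf, hq⟩ := hInv
      have hkeys : dA.keys = p.keys := keys_eq_of_items dA p hitems
      have hcont : dA.contains n = p.contains n := by
        rw [PySem.Dict.contains_eq_decide_mem_keys, PySem.Dict.contains_eq_decide_mem_keys, hkeys]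
      simp only [List.foldl_cons]
      cases hn : p.contains n with
      | true =>
          have hnA : dA.contains n = true := by rw [hcont, hn]
          simp only [stepA, stepB, hn, hnA, if_pos]
          exact ih dA p order q ⟨hord, hitems, hwf, hq⟩ hc
      | false =>
          have hnA : dA.contains n = false := by rw [hcont, hn]
          have hnk : n ∉ p.keys := by
            rw [PySem.Dict.contains_eq_decide_mem_keys] at hn
            simpa using hn
          have hck : c ∈ p.keys := by
            rw [PySem.Dict.contains_eq_decide_mem_keys] at hc
            simpa using hc
          have hrev' : (p.insert n (some c)).items.reverse = (n, some c) :: p.items.reverse := by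
            rw [PySem.Dict.items_insert_of_not_contains _ _ hn]
            simp
          have hgetD : dA.getD c [] = rpath p.items.reverse c := by
            have hmem : (c, rpath p.items.reverse c) ∈ dA.items := by
              rw [hitems]
              exact List.mem_map_of_mem hck
            have hnd : dA.keys.Nodup := by rw [hkeys]; exact nodup_keys_of_wfp p hwf
            exact PySem.Dict.getD_of_mem_items _ hmem hnd []
          have hInv' : BfsInv (dA.insert n (dA.getD c [] ++ [n])) (p.insert n (some c))
              (order ++ [n]) (q ++ [n]) := by
            refine ⟨?_, ?_, ?_, ?_⟩
            · rw [hord, PySem.Dict.keys_insert_of_not_contains _ _ hn]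
            · rw [PySem.Dict.items_insert_of_not_contains _ _ hnA,
                PySem.Dict.keys_insert_of_not_contains _ _ hn, hrev']
              rw [List.map_append]
              congr 1
              · rw [hitems]
                refine List.map_congr_left (fun m hm => ?_)
                have hmn : m ≠ n := fun e => hnk (e ▸ hm)
                simp only [rpath, if_neg hmn]
              · simp [rpath, hgetD]
            · rw [hrev']
              refine ⟨?_, ?_, hwf⟩
              · intro c' hc'
                rw [Option.some_inj] at hc'
                exact hc' ▸ mem_rev_fst_of_mem_keys p c hck
              · intro hmem
                rw [List.map_reverse, List.mem_reverse] at hmem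
                exact hnk (by simpa [PySem.Dict.keys] using hmem)
            · intro x hx
              rcases List.mem_append.mp hx with hx | hx
              · rw [PySem.Dict.contains_insert]
                simp [hq x hx]
              · simp only [List.mem_singleton] at hx
                subst hx
                exact PySem.Dict.contains_insert_self _ _ _
          have hc' : (p.insert n (some c)).contains c = true := by
            rw [PySem.Dict.contains_insert]
            simp [hc]
          simp only [stepA, stepB, hn, hnA, Bool.false_eq_true, if_false]
          exact ih _ _ _ _ hInv' hc'
theorem loop_coupled (gd : PySem.Dict Int (List Int)) (f : Nat) :
    ∀ (q : List Int) (dA : PySem.Dict Int (List Int)) (p : PySem.Dict Int (Option Int))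
      (order : List Int), BfsInv dA p order q →
      (loopA gd f q dA).items =
        (loopB gd f q p order).2.map
          (fun n => (n, rpath (loopB gd f q p order).1.items.reverse n)) ∧
      wfp (loopB gd f q p order).1.items.reverse ∧
      (loopB gd f q p order).2 = (loopB gd f q p order).1.keys := by
  induction f with
  | zero =>
      intro q dA p order hInv
      obtain ⟨hord, hitems, hwf, _⟩ := hInv
      exact ⟨by simpa [loopA, loopB, hord.symm] using hitems, by simpa [loopB] using hwf,
        by simpa [loopB] using hord⟩
  | succ f ih =>
      intro q dA p order hInv
      cases q with
      | nil =>
          obtain ⟨hord, hitems, hwf, _⟩ := hInv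
          exact ⟨by simpa [loopA, loopB, hord.symm] using hitems, by simpa [loopB] using hwf,
            by simpa [loopB] using hord⟩
      | cons c rest =>
          obtain ⟨hord, hitems, hwf, hq⟩ := hInv
          have hc : p.contains c = true := hq c List.mem_cons_self
          obtain ⟨hInv', hqeq, _⟩ :=
            fold_coupled c ((gd.get? c).getD []) dA p order rest
              ⟨hord, hitems, hwf, fun x hx => hq x (List.mem_cons_of_mem _ hx)⟩ hc
          simp only [loopA, loopB]
          rw [hqeq]
          exact ih _ _ _ _ hInv'
-- ===== VERDICT (by name: the statement is the Claim_ definition above) =====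
theorem bfs_allpaths_spec : Claim_equal_bfs_allpaths := by
  intro G v _ _
  unfold Spec_bfs_allpaths bfs_allpaths bfs_allpaths_alt
  simp only []
  have hInv0 : BfsInv (PySem.Dict.empty.insert v [v]) (PySem.Dict.empty.insert v none)
      [v] [v] := by
    have hc : (PySem.Dict.empty (κ := Int) (ν := Option Int)).contains v = false :=
      PySem.Dict.contains_empty v
    have hcA : (PySem.Dict.empty (κ := Int) (ν := List Int)).contains v = false :=
      PySem.Dict.contains_empty v
    have hiB : (PySem.Dict.empty.insert v (none : Option Int)).items = [(v, none)] := by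
      rw [PySem.Dict.items_insert_of_not_contains _ _ hc]; rfl
    have hiA : (PySem.Dict.empty.insert v [v]).items = [(v, [v])] := by
      rw [PySem.Dict.items_insert_of_not_contains _ _ hcA]; rfl
    have hkB : (PySem.Dict.empty.insert v (none : Option Int)).keys = [v] := by
      rw [PySem.Dict.keys_insert_of_not_contains _ _ hc]; rfl
    refine ⟨hkB.symm, ?_, ?_, ?_⟩
    · rw [hiA, hiB, hkB]
      simp [rpath]
    · rw [hiB]
      simp [wfp]
    · intro x hx
      simp only [List.mem_singleton] at hx
      subst hx
      exact PySem.Dict.contains_insert_self _ _ _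
  obtain ⟨hitems, hwf, hord⟩ :=
    loop_coupled (PySem.Dict.ofList G) (pvFuel G) [v] (PySem.Dict.empty.insert v [v])
      (PySem.Dict.empty.insert v none) [v] hInv0
  set st := loopB (PySem.Dict.ofList G) (pvFuel G) [v] (PySem.Dict.empty.insert v none) [v]
    with hst
  rw [hitems]
  have hfr := PySem.Dict.items_foldl_insert_fresh (l := st.2) (d := PySem.Dict.empty)
    (k := fun n => n) (v := fun n => walkB st.1 (st.1.size + 1) (some n) [])
    (fun a _ => PySem.Dict.contains_empty a)
    (by rw [hord]; simpa using nodup_keys_of_wfp st.1 hwf)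
  simp only [] at hfr
  rw [hfr]
  have hie : (PySem.Dict.empty (κ := Int) (ν := List Int)).items = [] := rfl
  rw [hie, List.nil_append]
  refine (List.map_congr_left (fun n hn => ?_)).symm
  have hnk : n ∈ st.1.keys := hord ▸ hn
  have hrev : n ∈ st.1.items.reverse.map Prod.fst := mem_rev_fst_of_mem_keys st.1 n hnk
  have hlen : (rpath st.1.items.reverse n).length ≤ st.1.size + 1 := by
    have h1 := rpath_len_le st.1.items.reverse n
    simp only [List.length_reverse] at h1
    have h2 : st.1.items.length = st.1.size := rfl
    omega
  rw [walkB_eq_rpath st.1 (st.1.size + 1) n [] hwf hrev hlen]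
  simp
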